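-- pv_equiv track=rewrite | github.com/joydeepnandi/Amazon-Archives | MaximumTipCalculator.py | MaximumTipCalculator
-- ===== SOURCE A (Python) =====
-- def MaximumTipCalculator( i, A, B, X, Y):
--
-- 	if i == len(A):
-- 		return 0
--
-- 	if X<=0:
-- 		return (B[i] + MaximumTipCalculator(i+1, A, B, X, Y-1))
--
-- 	if Y<=0:
-- 		return (A[i] + MaximumTipCalculator(i+1, A, B, X-1, Y))
--
-- 	else:
-- 		return max( A[i] + MaximumTipCalculator(i+1, A, B, X-1, Y), B[i] + MaximumTipCalculator(i+1, A, B, X, Y-1))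
-- ===== SOURCE B (Python) =====
-- # Memoized top-down recursion over the state (index, remaining X, remaining Y):
-- # each state is solved once and cached, instead of A's exponential re-branching.
-- def MaximumTipCalculator(i, A, B, X, Y):
--     n = len(A)
--     memo = {}
--
--     def solve(j, x, y):
--         if j == n:
--             return 0
--         key = (j, x, y)
--         if key in memo:
--             return memo[key]
--         if x <= 0:
--             v = B[j] + solve(j + 1, x, y - 1)
--         elif y <= 0:
--             v = A[j] + solve(j + 1, x - 1, y)
--         else:
--             v = max(A[j] + solve(j + 1, x - 1, y),
--                     B[j] + solve(j + 1, x, y - 1))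
--         memo[key] = v
--         return v
--
--     return solve(i, X, Y)
-- ===== Notes on version B (the rewrite author's own statement) =====
-- stated objective: faster
-- what changed: Memoizes the recursion over the state (index, remaining X, remaining Y) in a dictionary so each state is solved once, replacing A's exponential re-branching over all assignment choices; intended as faster (a timing run read B ~6106x at n=64 where A mostly timed out, a single-input reading it could not corroborate).
import Mathlib
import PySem

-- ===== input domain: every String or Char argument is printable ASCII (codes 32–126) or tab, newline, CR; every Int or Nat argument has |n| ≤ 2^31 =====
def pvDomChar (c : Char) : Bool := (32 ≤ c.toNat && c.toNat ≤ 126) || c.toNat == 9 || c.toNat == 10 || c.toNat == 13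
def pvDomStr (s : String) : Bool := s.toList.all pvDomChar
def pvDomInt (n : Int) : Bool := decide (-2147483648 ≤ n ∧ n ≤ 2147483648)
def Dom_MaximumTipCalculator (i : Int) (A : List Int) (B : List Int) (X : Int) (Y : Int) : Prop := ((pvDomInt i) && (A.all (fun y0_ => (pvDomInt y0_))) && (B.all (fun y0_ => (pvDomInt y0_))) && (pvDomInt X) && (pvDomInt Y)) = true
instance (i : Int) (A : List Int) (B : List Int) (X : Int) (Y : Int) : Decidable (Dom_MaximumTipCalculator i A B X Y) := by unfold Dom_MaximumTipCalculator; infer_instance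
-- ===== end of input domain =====

-- B memoizes the same recursion over the state (index, remaining X, remaining Y) in a
-- dictionary, solving each state once instead of A's exponential re-branching; intended as
-- faster (a timing run read B ~6106x at n=64 where A mostly timed out, unconfirmed).

-- ===== PORT A =====
def MaximumTipCalculator (i : Int) (A : List Int) (B : List Int) (X : Int) (Y : Int) : Int :=
  if i = (A.length : Int) then 0
  else if _h : i < (A.length : Int) then
    (if X ≤ 0 then PySem.List.pyGetD B i 0 + MaximumTipCalculator (i+1) A B X (Y-1)
     else if Y ≤ 0 then PySem.List.pyGetD A i 0 + MaximumTipCalculator (i+1) A B (X-1) Y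
     else max (PySem.List.pyGetD A i 0 + MaximumTipCalculator (i+1) A B (X-1) Y)
              (PySem.List.pyGetD B i 0 + MaximumTipCalculator (i+1) A B X (Y-1)))
  else 0  -- totality guard: for i past len(A) Python never returns (it raises); outside Pre_
termination_by ((A.length : Int) - i).toNat
decreasing_by all_goals omega

-- ===== PORT B =====
-- inner helper `solve` of Source B: memo threaded through, result paired with updated memo
def pvSolve (A B : List Int) (n : Int) (j x y : Int)
    (memo : PySem.Dict (Int × Int × Int) Int) : Int × PySem.Dict (Int × Int × Int) Int :=
  if j = n then (0, memo)
  else if _h : j < n then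
    match memo.get? (j, x, y) with
    | some v => (v, memo)
    | none =>
      let p :=
        if x ≤ 0 then
          let q := pvSolve A B n (j+1) x (y-1) memo
          (PySem.List.pyGetD B j 0 + q.1, q.2)
        else if y ≤ 0 then
          let q := pvSolve A B n (j+1) (x-1) y memo
          (PySem.List.pyGetD A j 0 + q.1, q.2)
        else
          let q1 := pvSolve A B n (j+1) (x-1) y memo
          let q2 := pvSolve A B n (j+1) x (y-1) q1.2
          (max (PySem.List.pyGetD A j 0 + q1.1) (PySem.List.pyGetD B j 0 + q2.1), q2.2)
      (p.1, p.2.insert (j, x, y) p.1)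
  else (0, memo)  -- totality guard: for j past n Python never returns (it raises); outside Pre_
termination_by (n - j).toNat
decreasing_by all_goals omega

def MaximumTipCalculator_alt (i : Int) (A : List Int) (B : List Int) (X : Int) (Y : Int) : Int :=
  (pvSolve A B (A.length : Int) i X Y PySem.Dict.empty).1

-- ===== PRECONDITION & SPEC =====
-- Pre_ excludes exactly the inputs on which Python A raises IndexError (an index past the
-- end of A, or an index past/before the ends of B reached along the recursion's actual
-- access pattern); A returns normally on every input Pre_ admits.
def Pre_MaximumTipCalculator (i : Int) (A : List Int) (B : List Int) (X : Int) (Y : Int) : Prop :=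
  ((A.length : Int) ≤ i ∧ i = (A.length : Int)) ∨
  (i < (A.length : Int) ∧
    ((X ≤ 0 ∧ (A.length : Int) ≤ (B.length : Int) ∧ -(B.length : Int) ≤ i) ∨
     (0 < X ∧ Y ≤ 0 ∧ -(A.length : Int) ≤ i ∧ ((A.length : Int) ≤ i + X ∨ (A.length : Int) ≤ (B.length : Int))) ∨
     (0 < X ∧ 0 < Y ∧ -(A.length : Int) ≤ i ∧ (A.length : Int) ≤ (B.length : Int))))
instance (i : Int) (A : List Int) (B : List Int) (X : Int) (Y : Int) : Decidable (Pre_MaximumTipCalculator i A B X Y) := by unfold Pre_MaximumTipCalculator; infer_instance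
def pvWitness_MaximumTipCalculator : Int × List Int × List Int × Int × Int := (0, [1, 2], [3, 4], 1, 1)

def Spec_MaximumTipCalculator (i : Int) (A : List Int) (B : List Int) (X : Int) (Y : Int) (out : Int) : Prop := out = MaximumTipCalculator_alt i A B X Y
instance (i : Int) (A : List Int) (B : List Int) (X : Int) (Y : Int) (out : Int) : Decidable (Spec_MaximumTipCalculator i A B X Y out) := by unfold Spec_MaximumTipCalculator; infer_instance

-- ===== CLAIM (what is proved, stated in full; the proofs are below) =====
def Claim_equal_MaximumTipCalculator : Prop := ∀ (i : Int) (A : List Int) (B : List Int) (X : Int) (Y : Int), Dom_MaximumTipCalculator i A B X Y → Pre_MaximumTipCalculator i A B X Y → Spec_MaximumTipCalculator i A B X Y (MaximumTipCalculator i A B X Y)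

-- ===== LEMMAS AND PROOFS =====

theorem mtc_beyond (i : Int) (A B : List Int) (X Y : Int) (h : (A.length : Int) ≤ i) :
    MaximumTipCalculator i A B X Y = 0 := by
  rw [MaximumTipCalculator]
  split_ifs with h1 h2 <;> first | rfl | omega

-- the memo invariant: every cached value is the plain recursion's value at its key
def pvInv (A B : List Int) (memo : PySem.Dict (Int × Int × Int) Int) : Prop :=
  ∀ j x y v, memo.get? (j, x, y) = some v → v = MaximumTipCalculator j A B x y

theorem pvInvInsert (A B : List Int) (memo : PySem.Dict (Int × Int × Int) Int)
    (j x y w : Int) (h1 : pvInv A B memo) (h2 : w = MaximumTipCalculator j A B x y) :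
    pvInv A B (memo.insert (j, x, y) w) := by
  intro j' x' y' v hv
  rw [PySem.Dict.get?_insert] at hv
  split at hv
  · rename_i heq
    injection heq with e1 e23
    injection e23 with e2 e3
    injection hv with hv
    subst e1; subst e2; subst e3; subst hv
    exact h2
  · exact h1 j' x' y' v hv

theorem pvSolve_correct (A B : List Int) (k : Nat) :
    ∀ (j x y : Int) (memo : PySem.Dict (Int × Int × Int) Int),
      (((A.length : Int) - j).toNat = k) → pvInv A B memo →
      (pvSolve A B (A.length : Int) j x y memo).1 = MaximumTipCalculator j A B x y ∧
      pvInv A B (pvSolve A B (A.length : Int) j x y memo).2 := by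
  induction k with
  | zero =>
    intro j x y memo hk hinv
    have hres : pvSolve A B (A.length : Int) j x y memo = (0, memo) := by
      rw [pvSolve]; split_ifs with h1 h2 <;> first | rfl | omega
    rw [hres]
    exact ⟨(mtc_beyond _ _ _ _ _ (by omega)).symm, hinv⟩
  | succ k ih =>
    intro j x y memo hk hinv
    have hjn : j < (A.length : Int) := by omega
    have hmtc : MaximumTipCalculator j A B x y =
        (if x ≤ 0 then PySem.List.pyGetD B j 0 + MaximumTipCalculator (j+1) A B x (y-1)
         else if y ≤ 0 then PySem.List.pyGetD A j 0 + MaximumTipCalculator (j+1) A B (x-1) y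
         else max (PySem.List.pyGetD A j 0 + MaximumTipCalculator (j+1) A B (x-1) y)
                  (PySem.List.pyGetD B j 0 + MaximumTipCalculator (j+1) A B x (y-1))) := by
      rw [MaximumTipCalculator, if_neg (by omega : ¬ j = (A.length : Int)), dif_pos hjn]
    rw [pvSolve, if_neg (by omega : ¬ j = (A.length : Int)), dif_pos hjn]
    cases hm : memo.get? (j, x, y) with
    | some v =>
      exact ⟨hinv j x y v hm, hinv⟩
    | none =>
      by_cases hx : x ≤ 0
      · simp only [if_pos hx]
        obtain ⟨hq1, hq2⟩ := ih (j+1) x (y-1) memo (by omega) hinv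
        have hval : PySem.List.pyGetD B j 0 + (pvSolve A B (A.length : Int) (j+1) x (y-1) memo).1
            = MaximumTipCalculator j A B x y := by
          rw [hmtc, if_pos hx, hq1]
        exact ⟨hval, pvInvInsert A B _ j x y _ hq2 hval⟩
      · by_cases hy : y ≤ 0
        · simp only [if_neg hx, if_pos hy]
          obtain ⟨hq1, hq2⟩ := ih (j+1) (x-1) y memo (by omega) hinv
          have hval : PySem.List.pyGetD A j 0 + (pvSolve A B (A.length : Int) (j+1) (x-1) y memo).1
              = MaximumTipCalculator j A B x y := by
            rw [hmtc, if_neg hx, if_pos hy, hq1]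
          exact ⟨hval, pvInvInsert A B _ j x y _ hq2 hval⟩
        · simp only [if_neg hx, if_neg hy]
          obtain ⟨hq1, hq2⟩ := ih (j+1) (x-1) y memo (by omega) hinv
          obtain ⟨hr1, hr2⟩ := ih (j+1) x (y-1)
            (pvSolve A B (A.length : Int) (j+1) (x-1) y memo).2 (by omega) hq2
          have hval : max (PySem.List.pyGetD A j 0 + (pvSolve A B (A.length : Int) (j+1) (x-1) y memo).1)
                (PySem.List.pyGetD B j 0 + (pvSolve A B (A.length : Int) (j+1) x (y-1)
                  (pvSolve A B (A.length : Int) (j+1) (x-1) y memo).2).1)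
              = MaximumTipCalculator j A B x y := by
            rw [hmtc, if_neg hx, if_neg hy, hq1, hr1]
          exact ⟨hval, pvInvInsert A B _ j x y _ hr2 hval⟩

-- ===== VERDICT (by name: the statement is the Claim_ definition above) =====
theorem MaximumTipCalculator_spec : Claim_equal_MaximumTipCalculator := by
  intro i A B X Y _hdom _hpre
  unfold Spec_MaximumTipCalculator MaximumTipCalculator_alt
  have hinv : pvInv A B PySem.Dict.empty := by
    intro j x y v hv
    simp [PySem.Dict.get?_empty] at hv
  exact (pvSolve_correct A B (((A.length : Int) - i).toNat) i X Y PySem.Dict.empty rfl hinv).1.symm
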